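-- pv_equiv track=rewrite | github.com/nikita1610/100PythonProblems | Problem96/Day96.py | equidistant
-- ===== SOURCE A (Python) =====
-- def equidistant(item):
--     flag=0
--     for i in range(len(item)-1):
--         if (ord(item[i+1])-ord(item[i]))!=(ord(item[1])-ord(item[0])):
--             flag=1
--             break
--     if flag==1:
--         return False
--     else:
--         return True
-- ===== SOURCE B (Python) =====
-- def equidistant(item):
--     diffs = {ord(item[i + 1]) - ord(item[i]) for i in range(len(item) - 1)}
--     return len(diffs) <= 1
-- ===== Notes on version B (the rewrite author's own statement) =====
-- stated objective: simpler
-- what changed: Replaces the flag/early-break loop comparing each consecutive difference to the first difference with building the set of all consecutive differences and checking it has at most one distinct element.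
import Mathlib
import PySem

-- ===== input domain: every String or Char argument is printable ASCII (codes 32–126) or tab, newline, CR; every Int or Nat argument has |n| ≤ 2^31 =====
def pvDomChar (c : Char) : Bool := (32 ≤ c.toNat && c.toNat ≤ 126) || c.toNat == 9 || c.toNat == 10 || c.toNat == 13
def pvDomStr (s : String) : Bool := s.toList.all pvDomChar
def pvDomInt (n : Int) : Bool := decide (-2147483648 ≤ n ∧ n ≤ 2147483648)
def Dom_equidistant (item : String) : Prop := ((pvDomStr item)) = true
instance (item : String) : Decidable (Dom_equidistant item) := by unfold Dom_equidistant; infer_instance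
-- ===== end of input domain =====

-- B replaces A's flag/early-break loop (each difference compared to the first) with building the
-- set of all consecutive character differences and checking it has at most one element (simpler).


-- ord(item[i]) ; always used at in-range indices here, so the pyGetD default is never reached
def pyOrdAt (cs : List Char) (i : Int) : Int :=
  ((PySem.List.pyGetD cs i ' ').toNat : Int)

-- ===== PORT A =====
-- the for-loop with flag/break: returns the final flag (0 = never broke, 1 = broke)
def eqLoopA (cs : List Char) : List Int → Int
  | [] => 0
  | i :: rest =>
    if (pyOrdAt cs (i + 1) - pyOrdAt cs i) ≠ (pyOrdAt cs 1 - pyOrdAt cs 0) then 1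
    else eqLoopA cs rest

def equidistant (item : String) : Bool :=
  let flag := eqLoopA item.toList (PySem.List.pyRange 0 (PySem.Str.len item - 1) 1)
  if flag = 1 then false else true

-- ===== PORT B =====
def equidistant_alt (item : String) : Bool :=
  let cs := item.toList
  let diffs : PySem.Set Int :=
    PySem.Set.ofList ((PySem.List.pyRange 0 (PySem.Str.len item - 1) 1).map
      (fun i => pyOrdAt cs (i + 1) - pyOrdAt cs i))
  decide (PySem.Set.len diffs ≤ 1)

-- ===== PRECONDITION & SPEC =====
def Spec_equidistant (item : String) (out : Bool) : Prop := out = equidistant_alt item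
instance (item : String) (out : Bool) : Decidable (Spec_equidistant item out) := by unfold Spec_equidistant; infer_instance

-- ===== CLAIM (what is proved, stated in full; the proofs are below) =====
def Claim_equal_equidistant : Prop := ∀ (item : String), Dom_equidistant item → Spec_equidistant item (equidistant item)

-- ===== LEMMAS AND PROOFS =====

-- A's loop returns 0 iff every difference equals the first
theorem eqLoopA_eq_zero_iff (cs : List Char) (l : List Int) :
    eqLoopA cs l = 0 ↔ ∀ i ∈ l, pyOrdAt cs (i + 1) - pyOrdAt cs i = pyOrdAt cs 1 - pyOrdAt cs 0 := by
  induction l with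
  | nil => simp [eqLoopA]
  | cons i rest ih =>
    by_cases h : (pyOrdAt cs (i + 1) - pyOrdAt cs i) = (pyOrdAt cs 1 - pyOrdAt cs 0)
    · simp [eqLoopA, h, ih]
    · simp [eqLoopA, h]

-- a deduplicated list has at most one element iff everything equals one of its members
theorem dedup_len_le_one_iff {ds : List Int} {b : Int} (hb : b ∈ ds) :
    (PySem.List.dedup ds).length ≤ 1 ↔ ∀ d ∈ ds, d = b := by
  constructor
  · intro hlen d hd
    have hd' : d ∈ PySem.List.dedup ds := (PySem.List.mem_dedup ds d).2 hd
    have hb' : b ∈ PySem.List.dedup ds := (PySem.List.mem_dedup ds b).2 hb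
    match hdd : PySem.List.dedup ds with
    | [] => rw [hdd] at hb'; simp at hb'
    | [x] => rw [hdd] at hd' hb'; simp at hd' hb'; omega
    | x :: y :: t => rw [hdd] at hlen; simp at hlen
  · intro hall
    have hnd := PySem.List.nodup_dedup ds
    match hdd : PySem.List.dedup ds with
    | [] => simp
    | [x] => simp
    | x :: y :: t =>
      exfalso
      have hx : x = b := hall x ((PySem.List.mem_dedup ds _).1 (by rw [hdd]; simp))
      have hy : y = b := hall y ((PySem.List.mem_dedup ds _).1 (by rw [hdd]; simp))
      rw [hdd] at hnd
      simp [List.nodup_cons] at hnd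
      exact hnd.1.1 (by omega)

theorem key_eq (cs : List Char) (k : Int) :
    (if eqLoopA cs (PySem.List.pyRange 0 k 1) = 1 then false else true) =
      decide (PySem.Set.len (PySem.Set.ofList ((PySem.List.pyRange 0 k 1).map
        (fun i => pyOrdAt cs (i + 1) - pyOrdAt cs i))) ≤ 1) := by
  set f : Int → Int := fun i => pyOrdAt cs (i + 1) - pyOrdAt cs i with hf
  by_cases hpos : 0 < k
  · -- nonempty range: 0 is a member, and f 0 is the reference difference
    have h0 : (0 : Int) ∈ PySem.List.pyRange 0 k 1 := (PySem.List.mem_pyRange_one).2 ⟨le_refl 0, hpos⟩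
    have hb : f 0 ∈ (PySem.List.pyRange 0 k 1).map f := List.mem_map.2 ⟨0, h0, rfl⟩
    have hset : PySem.Set.ofList ((PySem.List.pyRange 0 k 1).map f) = PySem.List.dedup ((PySem.List.pyRange 0 k 1).map f) := by
      simp
    rw [hset]
    have hiff := dedup_len_le_one_iff hb
    have hzero : f 0 = pyOrdAt cs 1 - pyOrdAt cs 0 := by simp [hf]
    by_cases hall : ∀ i ∈ PySem.List.pyRange 0 k 1, f i = pyOrdAt cs 1 - pyOrdAt cs 0
    · have hflag : eqLoopA cs (PySem.List.pyRange 0 k 1) = 0 := (eqLoopA_eq_zero_iff cs _).2 hall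
      have hlen : (PySem.List.dedup ((PySem.List.pyRange 0 k 1).map f)).length ≤ 1 := by
        refine hiff.2 ?_
        intro d hd
        obtain ⟨i, hi, rfl⟩ := List.mem_map.1 hd
        rw [hall i hi, hzero]
      simp [hflag, PySem.Set.len]
      exact_mod_cast hlen
    · have hflag : eqLoopA cs (PySem.List.pyRange 0 k 1) ≠ 0 := by
        intro h; exact hall ((eqLoopA_eq_zero_iff cs _).1 h)
      have hflag1 : eqLoopA cs (PySem.List.pyRange 0 k 1) = 1 := by
        generalize (PySem.List.pyRange 0 k 1) = l at hflag ⊢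
        induction l with
        | nil => simp [eqLoopA] at hflag
        | cons i rest ih =>
          by_cases h : (pyOrdAt cs (i + 1) - pyOrdAt cs i) = (pyOrdAt cs 1 - pyOrdAt cs 0)
          · simp [eqLoopA, h] at hflag ⊢; exact ih hflag
          · simp [eqLoopA, h]
      have hlen : ¬ (PySem.List.dedup ((PySem.List.pyRange 0 k 1).map f)).length ≤ 1 := by
        intro hle
        apply hall
        intro i hi
        have := hiff.1 hle (f i) (List.mem_map.2 ⟨i, hi, rfl⟩)
        rw [this, hzero]
      simp [hflag1, PySem.Set.len]
      exact_mod_cast Nat.lt_of_not_le hlen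
  · -- empty range: flag stays 0 and the diff set is empty; both sides are true
    have hnil : PySem.List.pyRange 0 k 1 = [] := PySem.List.pyRange_one_eq_nil (by omega)
    simp [hnil, eqLoopA, PySem.Set.len, PySem.Set.ofList]

-- ===== VERDICT (by name: the statement is the Claim_ definition above) =====
theorem equidistant_spec : Claim_equal_equidistant := by
  intro item _
  unfold Spec_equidistant equidistant equidistant_alt
  exact key_eq item.toList (PySem.Str.len item - 1)
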